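-- pv_equiv track=rewrite | github.com/Rudra2712/Plagiarism-detection-system | src/shingle.py | rolling_hashes
-- ===== SOURCE A (Python) =====
-- from typing import Iterable, List, Tuple
--
-- DEFAULT_K = 5
--
-- BASE = 257            # base for polynomial hash
--
-- MOD = 2_147_483_647   # large prime (2^31 - 1)
--
-- def token_to_int(tok: str) -> int:
--     """
--     Map token to a stable small integer for the rolling hash.
--     We mod by MOD to keep values bounded.
--     """
--     # Python built-in hash is salted per run; avoid it. Use deterministic.
--     val = 0
--     for ch in tok:
--         val = (val * 131 + ord(ch)) % MOD
--     return val
--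
-- def rolling_hashes(tokens: List[str], k: int = DEFAULT_K) -> List[Tuple[int, int]]:
--     """
--     Compute rolling Rabin–Karp hashes for k-length shingles.
--
--     Returns: list of (hash_value, start_index)
--     """
--     n = len(tokens)
--     if k <= 0 or n < k:
--         return []
--
--     tvals = [token_to_int(t) for t in tokens]
--
--     # Precompute BASE^(k-1) % MOD
--     pow_base = 1
--     for _ in range(k - 1):
--         pow_base = (pow_base * BASE) % MOD
--
--     # Initial hash
--     h = 0
--     for i in range(k):
--         h = (h * BASE + tvals[i]) % MOD
--     hashes = [(h, 0)]
--
--     for i in range(1, n - k + 1):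
--         # Remove oldest: tvals[i-1] * BASE^(k-1)
--         leading = (tvals[i - 1] * pow_base) % MOD
--         h = (h - leading) % MOD
--         # Multiply by base and add new
--         h = (h * BASE + tvals[i + k - 1]) % MOD
--         hashes.append((h, i))
--     return hashes
-- ===== SOURCE B (Python) =====
-- from typing import List, Tuple
--
-- DEFAULT_K = 5
-- BASE = 257
-- MOD = 2_147_483_647
--
-- def token_to_int(tok: str) -> int:
--     val = 0
--     for ch in tok:
--         val = (val * 131 + ord(ch)) % MOD
--     return val
--
-- def rolling_hashes(tokens: List[str], k: int = DEFAULT_K) -> List[Tuple[int, int]]: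
--     """Compute each k-shingle's polynomial hash directly (no rolling update)."""
--     n = len(tokens)
--     if k <= 0 or n < k:
--         return []
--     tvals = [token_to_int(t) for t in tokens]
--     out = []
--     for i in range(n - k + 1):
--         h = 0
--         for j in range(k):
--             h = (h * BASE + tvals[i + j]) % MOD
--         out.append((h, i))
--     return out
-- ===== Notes on version B (the rewrite author's own statement) =====
-- stated objective: simpler
-- what changed: Replaces the rolling Rabin-Karp update (pow_base precompute, subtract-leading-term, amortized reuse of the previous hash) with a direct nested loop that recomputes each window's polynomial hash from scratch.
import Mathlib
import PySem

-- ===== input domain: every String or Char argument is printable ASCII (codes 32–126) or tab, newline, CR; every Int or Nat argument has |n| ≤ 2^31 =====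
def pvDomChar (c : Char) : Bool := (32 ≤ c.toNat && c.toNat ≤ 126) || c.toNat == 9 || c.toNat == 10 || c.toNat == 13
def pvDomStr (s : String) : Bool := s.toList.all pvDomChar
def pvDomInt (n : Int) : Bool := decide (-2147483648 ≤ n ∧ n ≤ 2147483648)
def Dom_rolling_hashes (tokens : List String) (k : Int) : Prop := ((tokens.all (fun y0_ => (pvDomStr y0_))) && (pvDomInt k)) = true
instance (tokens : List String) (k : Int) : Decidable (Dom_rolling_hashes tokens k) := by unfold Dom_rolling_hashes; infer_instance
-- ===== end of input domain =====

-- B replaces A's rolling Rabin–Karp update (pow_base precompute + subtract-leading-term reuse of the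
-- previous window's hash) with a direct nested loop that recomputes each window's polynomial hash
-- from scratch (objective: simpler; not faster).

-- ===== PORT A =====
-- shared helper of both Pythons
def token_to_int (tok : String) : Int :=
  tok.toList.foldl (fun val ch => PySem.Int.mod (val * 131 + (ch.toNat : Int)) 2147483647) 0

-- main loop of A: rolling update reusing the previous hash
def rolling_hashes (tokens : List String) (k : Int) : List (Int × Int) :=
  let n : Int := tokens.length
  if k ≤ 0 ∨ n < k then []
  else
    let tvals := tokens.map token_to_int
    let pow_base := (PySem.List.pyRange 0 (k - 1) 1).foldl
      (fun pb _ => PySem.Int.mod (pb * 257) 2147483647) 1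
    let h0 := (PySem.List.pyRange 0 k 1).foldl
      (fun h i => PySem.Int.mod (h * 257 + PySem.List.pyGetD tvals i 0) 2147483647) 0
    let res := (PySem.List.pyRange 1 (n - k + 1) 1).foldl
      (fun (s : Int × List (Int × Int)) i =>
        let leading := PySem.Int.mod (PySem.List.pyGetD tvals (i - 1) 0 * pow_base) 2147483647
        let h1 := PySem.Int.mod (s.1 - leading) 2147483647
        let h2 := PySem.Int.mod (h1 * 257 + PySem.List.pyGetD tvals (i + k - 1) 0) 2147483647
        (h2, s.2 ++ [(h2, i)]))
      (h0, [(h0, 0)])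
    res.2

-- ===== PORT B =====
def rolling_hashes_alt (tokens : List String) (k : Int) : List (Int × Int) :=
  let n : Int := tokens.length
  if k ≤ 0 ∨ n < k then []
  else
    let tvals := tokens.map token_to_int
    (PySem.List.pyRange 0 (n - k + 1) 1).foldl
      (fun out i =>
        let h := (PySem.List.pyRange 0 k 1).foldl
          (fun h j => PySem.Int.mod (h * 257 + PySem.List.pyGetD tvals (i + j) 0) 2147483647) 0
        out ++ [(h, i)]) []

-- ===== PRECONDITION & SPEC =====
def Spec_rolling_hashes (tokens : List String) (k : Int) (out : List (Int × Int)) : Prop := out = rolling_hashes_alt tokens k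
instance (tokens : List String) (k : Int) (out : List (Int × Int)) : Decidable (Spec_rolling_hashes tokens k out) := by unfold Spec_rolling_hashes; infer_instance

-- ===== CLAIM (what is proved, stated in full; the proofs are below) =====
def Claim_equal_rolling_hashes : Prop := ∀ (tokens : List String) (k : Int), Dom_rolling_hashes tokens k → Spec_rolling_hashes tokens k (rolling_hashes tokens k)

-- ===== LEMMAS AND PROOFS =====

-- the un-modded polynomial accumulation and the from-scratch hash of the K-window at i
def pvP (l : List Int) (s : Int) : Int := l.foldl (fun a x => a * 257 + x) s
def pvH (tv : List Int) (i K : Nat) : Int := pvP ((tv.drop i).take K) 0 % 2147483647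

lemma pvP_append_singleton (l : List Int) (y s : Int) :
    pvP (l ++ [y]) s = pvP l s * 257 + y := by
  simp [pvP]

lemma pvP_shift (l : List Int) (s : Int) :
    pvP l s = s * 257 ^ l.length + pvP l 0 := by
  induction l generalizing s with
  | nil => simp [pvP]
  | cons x l ih =>
    rw [show pvP (x :: l) s = pvP l (s * 257 + x) from rfl,
        show pvP (x :: l) 0 = pvP l (0 * 257 + x) from rfl,
        ih (s * 257 + x), ih (0 * 257 + x)]
    simp [List.length_cons]
    ring

lemma foldl_mh (l : List Int) (s : Int) :
    l.foldl (fun a x => (a * 257 + x) % 2147483647) (s % 2147483647)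
      = pvP l s % 2147483647 := by
  induction l generalizing s with
  | nil => simp [pvP]
  | cons x l ih =>
    show l.foldl _ ((s % 2147483647 * 257 + x) % 2147483647) = pvP l (s * 257 + x) % 2147483647
    have hm : Int.ModEq 2147483647 (s % 2147483647) s := Int.emod_emod_of_dvd s dvd_rfl
    have e : (s % 2147483647 * 257 + x) % 2147483647 = (s * 257 + x) % 2147483647 :=
      (hm.mul_right 257).add_right x
    rw [e, ih (s * 257 + x)]

lemma map_range_getD (tv : List Int) (i K : Nat) (h : i + K ≤ tv.length) :
    (List.range K).map (fun j => tv.getD (i + j) 0) = (tv.drop i).take K := by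
  apply List.ext_getElem
  · simp; omega
  · intro j h1 h2
    simp at h1 h2 ⊢
    rw [List.getElem?_eq_getElem (show i + j < tv.length by omega)]
    rfl

lemma inner_eq (tv : List Int) (i K : Nat) (h : i + K ≤ tv.length) :
    (List.range K).foldl (fun a j => (a * 257 + tv.getD (i + j) 0) % 2147483647) 0
      = pvH tv i K := by
  rw [show (List.range K).foldl (fun a j => (a * 257 + tv.getD (i + j) 0) % 2147483647) 0
        = ((List.range K).map (fun j => tv.getD (i + j) 0)).foldl
            (fun a x => (a * 257 + x) % 2147483647) 0
        from (@List.foldl_map _ _ _ (fun j => tv.getD (i + j) 0)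
          (fun a x => (a * 257 + x) % 2147483647) (List.range K) 0).symm,
      map_range_getD tv i K h, pvH]
  have := foldl_mh ((tv.drop i).take K) 0
  norm_num at this
  exact this

lemma inner_eq0 (tv : List Int) (K : Nat) (h : K ≤ tv.length) :
    (List.range K).foldl (fun a j => (a * 257 + tv.getD j 0) % 2147483647) 0
      = pvH tv 0 K := by
  have := inner_eq tv 0 K (by omega)
  simpa using this

lemma pow_loop (c : Nat) :
    (List.range c).foldl (fun pb (_ : Nat) => pb * 257 % 2147483647) (1 : Int)
      = 257 ^ c % 2147483647 := by
  induction c with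
  | zero => decide
  | succ c ih =>
    rw [List.range_succ, List.foldl_append, ih]
    show 257 ^ c % 2147483647 * 257 % 2147483647 = _
    rw [pow_succ]
    omega

lemma mod_magic (a Q T y : Int) :
    (((a * Q + T) % 2147483647 - a * (Q % 2147483647) % 2147483647) % 2147483647 * 257 + y)
        % 2147483647
      = (T * 257 + y) % 2147483647 := by
  have mQ : Int.ModEq 2147483647 (Q % 2147483647) Q := Int.emod_emod_of_dvd Q dvd_rfl
  have m0 : Int.ModEq 2147483647 ((a * Q + T) % 2147483647) (a * Q + T) :=
    Int.emod_emod_of_dvd _ dvd_rfl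
  have m1 : Int.ModEq 2147483647 (a * (Q % 2147483647) % 2147483647) (a * Q) :=
    (Int.emod_emod_of_dvd _ dvd_rfl).trans (mQ.mul_left a)
  have m2 := m0.sub m1
  have e : a * Q + T - a * Q = T := by ring
  rw [e] at m2
  have m3 : Int.ModEq 2147483647
      (((a * Q + T) % 2147483647 - a * (Q % 2147483647) % 2147483647) % 2147483647) T :=
    (Int.emod_emod_of_dvd _ dvd_rfl).trans m2
  exact (m3.mul_right 257).add_right y

lemma roll_step (tv : List Int) (i K : Nat) (hK : 1 ≤ K) (h : i + 1 + K ≤ tv.length) :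
    ((pvH tv i K - tv.getD i 0 * (257 ^ (K - 1) % 2147483647) % 2147483647) % 2147483647
        * 257 + tv.getD (i + K) 0) % 2147483647
      = pvH tv (i + 1) K := by
  obtain ⟨K', rfl⟩ : ∃ K', K = K' + 1 := ⟨K - 1, by omega⟩
  have hi : i < tv.length := by omega
  have hik : i + (K' + 1) < tv.length := by omega
  have hik' : i + 1 + K' < tv.length := by omega
  have f1 : (tv.drop i).take (K' + 1) = tv[i] :: (tv.drop (i + 1)).take K' := by
    rw [List.drop_eq_getElem_cons hi, List.take_succ_cons]
  have f2 : (tv.drop (i + 1)).take (K' + 1)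
      = (tv.drop (i + 1)).take K' ++ [tv[i + (K' + 1)]] := by
    rw [List.take_add_one, List.getElem?_drop]
    have e : i + 1 + K' = i + (K' + 1) := by omega
    rw [List.getElem?_eq_getElem (e ▸ hik)]
    simp [e]
  have hlen : ((tv.drop (i + 1)).take K').length = K' := by
    simp; omega
  rw [pvH, pvH, f1, f2,
      show pvP (tv[i] :: (tv.drop (i + 1)).take K') 0
          = pvP ((tv.drop (i + 1)).take K') ((0 : Int) * 257 + tv[i]) from rfl,
      show ((0 : Int) * 257 + tv[i]) = tv[i] by ring,
      pvP_shift ((tv.drop (i + 1)).take K') tv[i], hlen, pvP_append_singleton,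
      List.getD_eq_getElem tv 0 hi, List.getD_eq_getElem tv 0 hik,
      Nat.add_sub_cancel]
  exact mod_magic tv[i] (257 ^ K') (pvP ((tv.drop (i + 1)).take K') 0) tv[i + (K' + 1)]

lemma A_loop (tv : List Int) (K : Nat) (hK : 1 ≤ K) (c : Nat) (hc : c + K ≤ tv.length)
    (acc : List (Int × Int)) :
    (List.range c).foldl
      (fun (s : Int × List (Int × Int)) (y : Nat) =>
        (((s.1 - tv.getD y 0 * (257 ^ (K - 1) % 2147483647) % 2147483647) % 2147483647 * 257
            + tv.getD (y + K) 0) % 2147483647,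
         s.2 ++ [(((s.1 - tv.getD y 0 * (257 ^ (K - 1) % 2147483647) % 2147483647) % 2147483647
            * 257 + tv.getD (y + K) 0) % 2147483647, 1 + (y : Int))]))
      (pvH tv 0 K, acc)
    = (pvH tv c K, acc ++ (List.range c).map (fun j => (pvH tv (j + 1) K, 1 + (j : Int)))) := by
  induction c with
  | zero => simp
  | succ c ih =>
    rw [List.range_succ, List.foldl_append, ih (by omega), List.foldl_cons, List.foldl_nil]
    rw [roll_step tv c K hK (by omega)]
    simp

-- ===== VERDICT (by name: the statement is the Claim_ definition above) =====
theorem rolling_hashes_spec : Claim_equal_rolling_hashes := by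
  intro tokens k _
  show rolling_hashes tokens k = rolling_hashes_alt tokens k
  by_cases hg : k ≤ 0 ∨ (tokens.length : Int) < k
  · simp [rolling_hashes, rolling_hashes_alt, hg]
  · push Not at hg
    obtain ⟨hk0, hkn⟩ := hg
    obtain ⟨K, rfl⟩ : ∃ K : Nat, k = (K : Int) := ⟨k.toNat, by omega⟩
    have hK1 : 1 ≤ K := by exact_mod_cast hk0
    have hKN : K ≤ tokens.length := by exact_mod_cast hkn
    have hlen : (tokens.map token_to_int).length = tokens.length := by simp
    simp only [rolling_hashes, rolling_hashes_alt,
      if_neg (show ¬((K:Int) ≤ 0 ∨ (tokens.length : Int) < K) by push Not; omega),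
      PySem.Int.mod_eq_emod_of_pos (show (0:Int) < 2147483647 by norm_num)]
    rw [show (tokens.length : Int) - (K:Int) + 1 = ((tokens.length - K + 1 : Nat) : Int) by
          push_cast [hKN]; ring,
        show ((K:Int) - 1) = ((K - 1 : Nat) : Int) by push_cast [hK1]; ring]
    simp only [PySem.List.pyRange_one, Int.sub_zero, Int.toNat_natCast, List.foldl_map,
      zero_add, PySem.List.pyGetD_natCast, pow_loop]
    rw [show (((tokens.length - K + 1 : Nat) : Int) - 1).toNat = tokens.length - K by omega]
    simp only [show ∀ y : Nat, (1 : Int) + (y : Int) - 1 = ((y : Nat) : Int) from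
        fun y => by ring,
      show ∀ y : Nat, (1 : Int) + (y : Int) + (K : Int) - 1 = ((y + K : Nat) : Int) from
        fun y => by push_cast; ring,
      show ∀ y j : Nat, ((y : Int) + (j : Int)) = ((y + j : Nat) : Int) from
        fun y j => by push_cast; ring,
      PySem.List.pyGetD_natCast]
    rw [inner_eq0 (tokens.map token_to_int) K (by omega)]
    rw [A_loop (tokens.map token_to_int) K hK1 (tokens.length - K) (by omega)]
    rw [PySem.List.foldl_congr_mem (List.range (tokens.length - K + 1)) _
      (fun out (y : Nat) => out ++ [(pvH (tokens.map token_to_int) y K, (y : Int))]) []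
      (by
        intro acc y hy
        simp only [List.mem_range] at hy
        rw [inner_eq (tokens.map token_to_int) y K (by omega)])]
    rw [show (List.range (tokens.length - K + 1)).foldl
          (fun out (y : Nat) => out ++ [(pvH (tokens.map token_to_int) y K, (y : Int))]) []
        = [] ++ (List.range (tokens.length - K + 1)).map
            (fun y => (pvH (tokens.map token_to_int) y K, (y : Int)))
        from PySem.List.foldl_append_singleton_eq_map ..]
    rw [show tokens.length - K + 1 = (tokens.length - K) + 1 from rfl, List.range_succ_eq_map]
    simp
    intro a _
    ring
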